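-- pv_equiv track=rewrite | github.com/BangDori/python-algorithm | programmers/high-score-kit/heap/더 맵게.py | solution
-- ===== SOURCE A (Python) =====
-- import heapq
--
-- def solution(scoville, K):
--     answer = 0
--
--     heapq.heapify(scoville)
--     while True:
--         first = heapq.heappop(scoville)
--         if first >= K:
--             break
--         if len(scoville) == 0:
--             answer = -1
--             break
--         second = heapq.heappop(scoville)
--         new_scovil = first + second * 2
--         heapq.heappush(scoville, new_scovil)
--         answer += 1
--
--     return answer
-- ===== SOURCE B (Python) =====
-- def solution(scoville, K):
--     # Sorted-list strategy instead of a heap: keep the pool fully sorted in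
--     # DESCENDING order so the two smallest sit at the end (pop() is O(1));
--     # reinsert the mixed value at its sorted position, scanning back from the
--     # end (the mix of the two minima usually belongs near the end).
--     # Mutates scoville in place like the original (return-value equivalence).
--     scoville.sort(reverse=True)
--     answer = 0
--     while True:
--         first = scoville.pop()
--         if first >= K:
--             return answer
--         if not scoville:
--             return -1
--         second = scoville.pop()
--         new = first + second * 2
--         i = len(scoville)
--         while i > 0 and scoville[i - 1] < new:
--             i -= 1
--         scoville.insert(i, new)
--         answer += 1
-- ===== Notes on version B (the rewrite author's own statement) =====
-- stated objective: faster
-- what changed: Replaces the binary min-heap (heapify/heappop/heappush) with a fully sorted descending list: sort once in C, pop the two smallest from the end in O(1), and reinsert the mix at its sorted position by a short backward scan, so a total order is maintained instead of a heap's partial order.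
import Mathlib
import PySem

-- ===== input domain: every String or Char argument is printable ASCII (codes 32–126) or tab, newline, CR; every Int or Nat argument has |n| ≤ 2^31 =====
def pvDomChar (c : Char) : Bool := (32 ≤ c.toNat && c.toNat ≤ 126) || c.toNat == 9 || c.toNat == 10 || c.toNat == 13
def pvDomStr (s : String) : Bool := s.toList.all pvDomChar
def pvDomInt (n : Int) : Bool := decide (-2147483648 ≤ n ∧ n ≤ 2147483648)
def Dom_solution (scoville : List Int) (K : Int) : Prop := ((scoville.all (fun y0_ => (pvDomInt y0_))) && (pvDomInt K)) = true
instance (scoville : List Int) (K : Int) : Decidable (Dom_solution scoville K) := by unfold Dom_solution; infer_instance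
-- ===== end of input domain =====

-- B keeps a fully sorted list (pop the two front minima, sorted reinsertion) instead of A's
-- binary heap; return-value equivalence only — both Pythons mutate the argument list in place,
-- leaving different residual contents behind.


-- ===== PORT A =====
-- heapq is a library A calls; it is ported by its contract on the multiset of elements:
-- heappop returns the minimum VALUE (ties are equal Ints, so the value is determined) and
-- removes one occurrence of it; heappush adds the element; heapify only rearranges.
-- The while-loop itself is transliterated step for step; the fuel (= list length, which
-- shrinks by exactly one per iteration) only makes the same computation total.
def solutionLoopA (K : Int) : Nat → List Int → Int → Int
  | 0, _, answer => answer                     -- fuel never runs out when started at length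
  | _ + 1, [], answer => answer                -- heappop on empty: Python raises (outside Pre_)
  | fuel + 1, h :: t, answer =>
    let first := t.foldl min h                 -- first = heapq.heappop(scoville)
    let rest := (h :: t).erase first
    if first ≥ K then answer                   -- if first >= K: break
    else
      match rest with
      | [] => -1                               -- if len(scoville) == 0: answer = -1; break
      | r1 :: r2 =>
        let second := r2.foldl min r1          -- second = heapq.heappop(scoville)
        let new_scovil := first + second * 2
        solutionLoopA K fuel (new_scovil :: rest.erase second) (answer + 1)

def solution (scoville : List Int) (K : Int) : Int :=
  solutionLoopA K scoville.length scoville 0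

-- ===== PORT B =====
-- Source B keeps the pool sorted DESCENDING and works at its END (pop(), backward scan,
-- insert near the tail). The port represents that list END-FIRST, i.e. reversed, so it is
-- ascending, pop() is head-pop, and Source B's backward scan `while i > 0 and scoville[i-1] < new`
-- + insert(i, new) is this walk from the representation's head past the strictly smaller
-- elements, placing the value there — the same values visited in the same order.
def insortB (v : Int) : List Int → List Int
  | [] => [v]
  | x :: xs => if x < v then x :: insortB v xs else v :: x :: xs

def solutionLoopB (K : Int) : Nat → List Int → Int → Int
  | 0, _, answer => answer
  | _ + 1, [], answer => answer                -- pop(0) on empty: Python raises (outside Pre_)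
  | fuel + 1, first :: rest, answer =>
    if first ≥ K then answer
    else
      match rest with
      | [] => -1
      | second :: rest2 =>
        solutionLoopB K fuel (insortB (first + second * 2) rest2) (answer + 1)

def solution_alt (scoville : List Int) (K : Int) : Int :=
  let s := PySem.List.sorted scoville (fun x => x) false
  solutionLoopB K s.length s 0

-- ===== PRECONDITION & SPEC =====
-- Pre_ excludes only the empty list, on which both Pythons raise IndexError (first pop).
def Pre_solution (scoville : List Int) (K : Int) : Prop := scoville ≠ []
instance (scoville : List Int) (K : Int) : Decidable (Pre_solution scoville K) := by unfold Pre_solution; infer_instance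
def pvWitness_solution : List Int × Int := ([1, 2, 3, 9, 10, 12], 7)

def Spec_solution (scoville : List Int) (K : Int) (out : Int) : Prop := out = solution_alt scoville K
instance (scoville : List Int) (K : Int) (out : Int) : Decidable (Spec_solution scoville K out) := by unfold Spec_solution; infer_instance

-- ===== CLAIM (what is proved, stated in full; the proofs are below) =====
def Claim_equal_solution : Prop := ∀ (scoville : List Int) (K : Int), Dom_solution scoville K → Pre_solution scoville K → Spec_solution scoville K (solution scoville K)

-- ===== LEMMAS AND PROOFS =====

-- the running-minimum fold over any permutation of a sorted cons is its head
theorem foldl_min_of_perm_sorted (h : Int) (t : List Int) (x : Int) (s : List Int)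
    (hp : (h :: t).Perm (x :: s)) (hs : (x :: s).Pairwise (· ≤ ·)) :
    t.foldl min h = x := by
  have hmin := PySem.List.min?_id_cons (x := h) (t := t)
  have hmem : t.foldl min h ∈ h :: t := PySem.List.min?_mem hmin
  have hle : ∀ y ∈ h :: t, t.foldl min h ≤ y := by
    intro y hy
    simpa using PySem.List.min?_isMin hmin y hy
  have hx_mem : x ∈ h :: t := hp.symm.subset (by simp)
  have h1 : t.foldl min h ≤ x := hle x hx_mem
  have h2 : x ≤ t.foldl min h := by
    have hm : t.foldl min h ∈ x :: s := hp.subset hmem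
    rcases List.mem_cons.mp hm with h' | h'
    · omega
    · exact (List.pairwise_cons.mp hs).1 _ h'
  omega

theorem insortB_perm (v : Int) (xs : List Int) : (insortB v xs).Perm (v :: xs) := by
  induction xs with
  | nil => simp [insortB]
  | cons x xs ih =>
    simp only [insortB]
    split
    · exact (ih.cons x).trans (List.Perm.swap v x xs)
    · exact List.Perm.refl _

theorem insortB_pairwise (v : Int) (xs : List Int) (hs : xs.Pairwise (· ≤ ·)) :
    (insortB v xs).Pairwise (· ≤ ·) := by
  induction xs with
  | nil => simp [insortB]
  | cons x xs ih =>
    rcases List.pairwise_cons.mp hs with ⟨hx, hxs⟩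
    simp only [insortB]
    split
    · rename_i hlt
      refine List.pairwise_cons.mpr ⟨?_, ih hxs⟩
      intro y hy
      have : y ∈ v :: xs := (insortB_perm v xs).subset hy
      rcases List.mem_cons.mp this with rfl | h'
      · omega
      · exact hx y h'
    · rename_i hge
      refine List.pairwise_cons.mpr ⟨?_, hs⟩
      intro y hy
      rcases List.mem_cons.mp hy with rfl | h'
      · omega
      · have := hx y h'; omega

-- main loop invariant: A's heap is a permutation of B's sorted list
theorem loop_eq (fuel : Nat) : ∀ (heap s : List Int) (K ans : Int),
    heap.Perm s → s.Pairwise (· ≤ ·) →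
    solutionLoopA K fuel heap ans = solutionLoopB K fuel s ans := by
  induction fuel with
  | zero => intro heap s K ans _ _; rfl
  | succ fuel ih =>
    intro heap s K ans hp hs
    cases s with
    | nil =>
      have : heap = [] := hp.eq_nil
      subst this; rfl
    | cons x s' =>
      cases heap with
      | nil => exact absurd hp.symm.eq_nil (by simp)
      | cons h t =>
        have hfirst : t.foldl min h = x := foldl_min_of_perm_sorted h t x s' hp hs
        have hrest : ((h :: t).erase (t.foldl min h)).Perm s' := by
          rw [hfirst]
          have := hp.erase x
          simpa using this
        simp only [solutionLoopA, solutionLoopB, hfirst]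
        split
        · rfl
        · cases s' with
          | nil =>
            have hz : (h :: t).erase x = [] := by
              have := hrest; rw [hfirst] at this; exact this.eq_nil
            rw [hz]
          | cons y s'2 =>
            have hne : (h :: t).erase x ≠ [] := by
              intro hnil
              have := hrest; rw [hfirst, hnil] at this
              exact absurd this.symm.eq_nil (by simp)
            rcases he : (h :: t).erase x with _ | ⟨r1, r2⟩
            · exact absurd he hne
            · rw [hfirst, he] at hrest
              have hs' : (y :: s'2).Pairwise (· ≤ ·) := (List.pairwise_cons.mp hs).2
              have hsecond : r2.foldl min r1 = y :=
                foldl_min_of_perm_sorted r1 r2 y s'2 hrest hs'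
              simp only [hsecond]
              apply ih
              · refine List.Perm.cons _ ?_ |>.trans (insortB_perm _ _).symm
                simpa using hrest.erase y
              · exact insortB_pairwise _ _ (List.pairwise_cons.mp hs').2

-- ===== VERDICT (by name: the statement is the Claim_ definition above) =====
theorem solution_spec : Claim_equal_solution := by
  intro scoville K _ _
  unfold Spec_solution solution solution_alt
  have hperm : scoville.Perm (PySem.List.sorted scoville (fun x => x) false) :=
    (PySem.List.sorted_perm (xs := scoville) (key := fun x => x) (rev := false)).symm
  have hlen : (PySem.List.sorted scoville (fun x => x) false).length = scoville.length :=
    hperm.length_eq.symm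
  simp only [hlen.symm]
  exact loop_eq _ _ _ _ _ hperm (by simpa using PySem.List.sorted_pairwise (xs := scoville) (key := fun x => x))
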